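-- pv_equiv track=rewrite | github.com/Jianglekang/code_repo_0407 | 第一题.py | get_min_number
-- ===== SOURCE A (Python) =====
-- def get_min_number(source, target):
--     def is_subsequence(src, tgt):
--         it = iter(src)
--         return all(c in it for c in tgt)
--
--     count = 0
--     i = 0
--
--     while i < len(target):
--         subseq = ""
--         for source_char in source:
--             if i < len(target) and target[i] == source_char:
--                 subseq += target[i]
--                 i += 1
--             if subseq and not is_subsequence(source, subseq):
--                 break
--         if not subseq:
--             return -1
--         count += 1
--
--     return count
-- ===== SOURCE B (Python) =====
-- def get_min_number(source, target):
--     # Single pass over target, jumping through source with str.find;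
--     # wrap (new copy of source) when no occurrence at or after pos.
--     if not target:
--         return 0
--     count = 1
--     pos = 0
--     for ch in target:
--         j = source.find(ch, pos)
--         if j < 0:
--             j = source.find(ch)
--             if j < 0:
--                 return -1
--             count += 1
--         pos = j + 1
--     return count
-- ===== Notes on version B (the rewrite author's own statement) =====
-- stated objective: faster
-- what changed: A repeatedly rescans the whole source pass by pass, re-verifying the collected subsequence with an O(|source|) is_subsequence check after every source character; B makes a single pass over target, jumping through source with str.find(ch, pos) and counting wraps, so the quadratic per-pass verification disappears.
import Mathlib
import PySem

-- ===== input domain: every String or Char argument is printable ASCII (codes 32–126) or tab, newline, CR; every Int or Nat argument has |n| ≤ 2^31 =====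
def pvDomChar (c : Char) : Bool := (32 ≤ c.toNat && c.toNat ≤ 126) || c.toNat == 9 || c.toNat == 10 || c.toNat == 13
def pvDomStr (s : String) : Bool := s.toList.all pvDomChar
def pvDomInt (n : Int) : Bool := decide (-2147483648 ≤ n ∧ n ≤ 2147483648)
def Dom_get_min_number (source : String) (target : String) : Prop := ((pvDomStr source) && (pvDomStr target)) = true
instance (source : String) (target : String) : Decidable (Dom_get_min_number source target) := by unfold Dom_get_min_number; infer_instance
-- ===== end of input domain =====

-- B replaces A's pass-by-pass rescans of source (with an inner is_subsequence re-check
-- after every source character) by a single pass over target using find-jumps with wrap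
-- counting; the equivalence proved is exact on all inputs (both functions are total).

-- ===== PORT A =====

-- `c in it` on an iterator: consume up to and through the first occurrence of c
def pvIsSubDrop (c : Char) : List Char → Option (List Char)
  | [] => none
  | a :: rest => if a = c then some rest else pvIsSubDrop c rest

-- is_subsequence(src, tgt): it = iter(src); all(c in it for c in tgt)
def pvIsSub : List Char → List Char → Bool
  | _, [] => true
  | src, c :: rest =>
    match pvIsSubDrop c src with
    | none => false
    | some src' => pvIsSub src' rest
termination_by _ tgt => tgt.length
decreasing_by simp

-- the inner `for source_char in source` loop of A, state (i, subseq); a `break`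
-- returns the state as it stands (t.getD i ' ' is target[i], guarded by i < len)
def pvInner (s t : List Char) : List Char → Nat → List Char → Nat × List Char
  | [], i, sub => (i, sub)
  | ch :: rest, i, sub =>
    let st := if i < t.length ∧ t.getD i ' ' = ch then (i + 1, sub ++ [t.getD i ' ']) else (i, sub)
    if st.2 ≠ [] ∧ pvIsSub s st.2 = false then st
    else pvInner s t rest st.1 st.2

-- termination lemma for the outer while loop: a pass never moves i backwards,
-- and the collected subseq length is exactly the number of consumed target chars
theorem pvInner_spec (s t : List Char) : ∀ (src : List Char) (i : Nat) (sub : List Char),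
    i ≤ (pvInner s t src i sub).1 ∧
    (pvInner s t src i sub).2.length = sub.length + ((pvInner s t src i sub).1 - i) := by
  intro src
  induction src with
  | nil => intro i sub; simp [pvInner]
  | cons ch rest ih =>
    intro i sub
    simp only [pvInner]
    split_ifs with hc hb hb
    · simp
    · have := ih (i + 1) (sub ++ [t.getD i ' '])
      simp only [List.length_append, List.length_cons, List.length_nil] at this ⊢
      omega
    · simp
    · have := ih i sub
      omega

-- the outer while loop of A
def pvOuter (s t : List Char) (i : Nat) (count : Int) : Int :=
  if h : i < t.length then
    if hr : (pvInner s t s i []).2 = [] then -1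
    else pvOuter s t (pvInner s t s i []).1 (count + 1)
  else count
termination_by t.length - i
decreasing_by
  have := pvInner_spec s t s i []
  have hlen : (pvInner s t s i []).2.length ≠ 0 := by
    intro h0; exact hr (List.eq_nil_of_length_eq_zero h0)
  simp at this
  omega

def get_min_number (source : String) (target : String) : Int :=
  pvOuter source.toList target.toList 0 0

-- ===== PORT B =====

-- the `for ch in target` loop of B, state (count, pos)
def pvAltLoop (source : String) : List Char → Int → Nat → Int
  | [], count, _ => count
  | c :: rest, count, pos =>
    let j := PySem.Str.findFrom source (String.ofList [c]) (pos : Int) none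
    if j < 0 then
      let j2 := PySem.Str.find source (String.ofList [c])
      if j2 < 0 then -1
      else pvAltLoop source rest (count + 1) (j2.toNat + 1)
    else pvAltLoop source rest count (j.toNat + 1)

def get_min_number_alt (source : String) (target : String) : Int :=
  if target.toList.isEmpty then 0
  else pvAltLoop source target.toList 1 0

-- ===== PRECONDITION & SPEC =====
def Spec_get_min_number (source : String) (target : String) (out : Int) : Prop := out = get_min_number_alt source target
instance (source : String) (target : String) (out : Int) : Decidable (Spec_get_min_number source target out) := by unfold Spec_get_min_number; infer_instance

-- ===== CLAIM (what is proved, stated in full; the proofs are below) =====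
def Claim_equal_get_min_number : Prop := ∀ (source : String) (target : String), Dom_get_min_number source target → Spec_get_min_number source target (get_min_number source target)

-- ===== LEMMAS AND PROOFS =====

-- reference form of one pass of A (inner loop stripped of subseq bookkeeping)
def pvPass (t : List Char) : List Char → Nat → Nat
  | [], i => i
  | ch :: rest, i => if i < t.length ∧ t.getD i ' ' = ch then pvPass t rest (i + 1) else pvPass t rest i

-- first (relative) index of c, used only in proofs
def pvHf (c : Char) : List Char → Option Nat
  | [] => none
  | a :: rest => if a = c then some 0 else (pvHf c rest).map (· + 1)

theorem pvHf_none (c : Char) : ∀ l : List Char, pvHf c l = none ↔ c ∉ l := by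
  intro l
  induction l with
  | nil => simp [pvHf]
  | cons a rest ih =>
    simp only [pvHf]
    by_cases h : a = c
    · subst h; simp
    · rw [if_neg h]
      simp only [Option.map_eq_none_iff, ih, List.mem_cons]
      constructor
      · intro hn hc
        rcases hc with hc | hc
        · exact h hc.symm
        · exact hn hc
      · intro hn hc
        exact hn (Or.inr hc)

theorem pvHf_some (c : Char) : ∀ (l : List Char) (m : Nat), pvHf c l = some m →
    l[m]? = some c ∧ ∀ i < m, l[i]? ≠ some c := by
  intro l
  induction l with
  | nil => intro m h; simp [pvHf] at h
  | cons a rest ih =>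
    intro m h
    simp only [pvHf] at h
    by_cases ha : a = c
    · rw [if_pos ha] at h
      have hm : m = 0 := by simpa using h.symm
      subst hm
      simp [ha]
    · rw [if_neg ha] at h
      obtain ⟨m', hm', hm1⟩ := Option.map_eq_some_iff.mp h
      obtain ⟨h1, h2⟩ := ih m' hm'
      subst hm1
      constructor
      · simpa using h1
      · intro i hi
        cases i with
        | zero => simp; intro hc; exact ha hc
        | succ k => simpa using h2 k (by omega)

theorem prefix_singleton_iff (c : Char) (l : List Char) : [c] <+: l ↔ l[0]? = some c := by
  cases l with
  | nil => simp
  | cons a rest =>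
    simp [List.cons_prefix_cons, eq_comm]

-- Chars.find on a singleton pattern computes pvHf
theorem pvFind_eq_hf (c : Char) (l : List Char) :
    PySem.Chars.find l [c] = match pvHf c l with | none => -1 | some m => (m : Int) := by
  cases hf : pvHf c l with
  | none =>
    have hn : c ∉ l := (pvHf_none c l).mp hf
    have : ¬ ([c] <:+: l) := by
      intro hin
      obtain ⟨p, q, hl⟩ := hin
      exact hn (by rw [← hl]; simp)
    simpa using (PySem.Chars.find_eq_neg_one_iff l [c]).mpr this
  | some m =>
    obtain ⟨h1, h2⟩ := pvHf_some c l m hf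
    have hmem : c ∈ l := by
      have := List.getElem?_eq_some_iff.mp h1
      obtain ⟨hlt, he⟩ := this
      exact he ▸ List.getElem_mem hlt
    have hinf : [c] <:+: l := by
      obtain ⟨p, q, hl⟩ := List.append_of_mem hmem
      exact ⟨p, q, by simp [hl]⟩
    have hnn : 0 ≤ PySem.Chars.find l [c] := (PySem.Chars.find_nonneg_iff l [c]).mpr hinf
    obtain ⟨hp, hmin⟩ := PySem.Chars.find_spec hnn
    have hpf : l[(PySem.Chars.find l [c]).toNat]? = some c := by
      have := (prefix_singleton_iff c (l.drop (PySem.Chars.find l [c]).toNat)).mp hp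
      simpa [List.getElem?_drop] using this
    have hcmp : (PySem.Chars.find l [c]).toNat = m := by
      rcases Nat.lt_trichotomy (PySem.Chars.find l [c]).toNat m with h | h | h
      · exact absurd hpf (h2 _ h)
      · exact h
      · exfalso
        apply hmin m h
        rw [prefix_singleton_iff]
        simpa [List.getElem?_drop] using h1
    have hred : PySem.Chars.find l [c] = ((PySem.Chars.find l [c]).toNat : Int) := by omega
    rw [hred, hcmp]

theorem pvPass_ge (t : List Char) : ∀ (src : List Char) (i : Nat), i ≤ pvPass t src i := by
  intro src
  induction src with
  | nil => intro i; simp [pvPass]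
  | cons ch rest ih =>
    intro i
    simp only [pvPass]
    split_ifs
    · have := ih (i + 1); omega
    · exact ih i

theorem pvPass_of_ge (t : List Char) : ∀ (src : List Char) (i : Nat), t.length ≤ i → pvPass t src i = i := by
  intro src
  induction src with
  | nil => intro i _; simp [pvPass]
  | cons ch rest ih =>
    intro i h
    simp only [pvPass]
    rw [if_neg (by omega)]
    exact ih i h

-- a pass consumes target[i] exactly at the first matching position, then continues after it
theorem pvPass_find (t : List Char) : ∀ (src : List Char) (m i : Nat), i < t.length →
    pvHf (t.getD i ' ') src = some m → pvPass t src i = pvPass t (src.drop (m + 1)) (i + 1) := by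
  intro src
  induction src with
  | nil => intro m i _ h; simp [pvHf] at h
  | cons a rest ih =>
    intro m i hi h
    simp only [pvHf] at h
    by_cases ha : a = t.getD i ' '
    · rw [if_pos ha] at h
      have hm : m = 0 := by simpa using h.symm
      subst hm
      simp only [pvPass]
      rw [if_pos ⟨hi, ha.symm⟩]
      simp
    · rw [if_neg ha] at h
      obtain ⟨m', hm', hm1⟩ := Option.map_eq_some_iff.mp h
      subst hm1
      simp only [pvPass]
      rw [if_neg (fun hc => ha hc.2.symm)]
      rw [ih m' i hi hm']
      simp [List.drop_succ_cons]

theorem pvPass_nofind (t : List Char) : ∀ (src : List Char) (i : Nat), i < t.length →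
    t.getD i ' ' ∉ src → pvPass t src i = i := by
  intro src
  induction src with
  | nil => intro i _ _; simp [pvPass]
  | cons a rest ih =>
    intro i hi hn
    simp only [pvPass]
    rw [if_neg (by simp at hn; tauto)]
    exact ih i hi (by simp at hn; tauto)

theorem pvIsSubDrop_of_sublist (c : Char) : ∀ (u v : List Char), List.Sublist (c :: u) v →
    ∃ v', pvIsSubDrop c v = some v' ∧ List.Sublist u v' := by
  intro u v
  induction v generalizing u with
  | nil => intro h; cases h
  | cons a v' ih =>
    intro h
    by_cases ha : a = c
    · refine ⟨v', by simp [pvIsSubDrop, ha], ?_⟩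
      cases h with
      | cons _ h' => exact (List.sublist_cons_self c u).trans h'
      | cons₂ _ h' => exact h'
    · cases h with
      | cons _ h' =>
        obtain ⟨w, hw, hu⟩ := ih u h'
        exact ⟨w, by simp [pvIsSubDrop, ha, hw], hu⟩
      | cons₂ _ h' => exact absurd rfl ha

theorem pvIsSub_of_sublist : ∀ (u v : List Char), List.Sublist u v → pvIsSub v u = true := by
  intro u
  induction u with
  | nil => intro v _; simp [pvIsSub]
  | cons c rest ih =>
    intro v h
    obtain ⟨v', hv, hu⟩ := pvIsSubDrop_of_sublist c rest v h
    simp [pvIsSub, hv]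
    exact ih v' hu

-- the break in A's inner loop never fires: subseq is a sublist of the scanned prefix
theorem pvInner_eq_pass (s t : List Char) : ∀ (src : List Char) (i : Nat) (sub p : List Char),
    p ++ src = s → List.Sublist sub p → (pvInner s t src i sub).1 = pvPass t src i := by
  intro src
  induction src with
  | nil => intro i sub p _ _; simp [pvInner, pvPass]
  | cons ch rest ih =>
    intro i sub p hp hsub
    have hps : List.Sublist p s := by
      rw [← hp]; exact List.sublist_append_left p (ch :: rest)
    simp only [pvInner, pvPass]
    by_cases hc : i < t.length ∧ t.getD i ' ' = ch
    · rw [if_pos hc, if_pos hc]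
      have hsub' : List.Sublist (sub ++ [t.getD i ' ']) (p ++ [ch]) := by
        rw [hc.2]; exact List.Sublist.append hsub (List.Sublist.refl _)
      have hps' : (p ++ [ch]) ++ rest = s := by simpa using hp
      have htrue : pvIsSub s (sub ++ [t.getD i ' ']) = true :=
        pvIsSub_of_sublist _ _ (hsub'.trans (by rw [← hps']; exact List.sublist_append_left _ _))
      rw [if_neg (fun hand => by rw [htrue] at hand; simp at hand)]
      exact ih (i + 1) (sub ++ [t.getD i ' ']) (p ++ [ch]) hps' hsub'
    · rw [if_neg hc, if_neg hc]
      have hsub' : List.Sublist sub (p ++ [ch]) :=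
        hsub.trans (List.sublist_append_left p [ch])
      have hps' : (p ++ [ch]) ++ rest = s := by simpa using hp
      by_cases hemp : sub = []
      · subst hemp
        rw [if_neg (by simp)]
        exact ih i [] (p ++ [ch]) hps' (List.nil_sublist _)
      · have htrue : pvIsSub s sub = true :=
          pvIsSub_of_sublist _ _ (hsub'.trans (by rw [← hps']; exact List.sublist_append_left _ _))
        rw [if_neg (fun hand => by rw [htrue] at hand; simp at hand)]
        exact ih i sub (p ++ [ch]) hps' hsub' 

-- main simulation: B's loop from (i, pos, count) computes A's outer loop after
-- finishing the current pass from position pos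
theorem pvMain (source : String) (t : List Char) : ∀ (n i pos : Nat) (count : Int),
    t.length - i ≤ n → pos ≤ source.toList.length →
    pvAltLoop source (t.drop i) count pos =
      pvOuter source.toList t (pvPass t (source.toList.drop pos) i) count := by
  intro n
  induction n with
  | zero =>
    intro i pos count hn hpos
    have hi : t.length ≤ i := by omega
    rw [List.drop_eq_nil_of_le hi]
    rw [pvPass_of_ge t _ i hi]
    rw [pvOuter]
    rw [dif_neg (by omega)]
    simp [pvAltLoop]
  | succ n ih =>
    intro i pos count hn hpos
    by_cases hi : i < t.length
    · -- one target character is processed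
      have hdrop : t.drop i = t.getD i ' ' :: t.drop (i + 1) := by
        rw [List.drop_eq_getElem_cons hi, List.getD_eq_getElem t ' ' hi]
      rw [hdrop]
      simp only [pvAltLoop]
      have hff : PySem.Str.findFrom source (String.ofList [t.getD i ' ']) ((pos : Nat) : Int) none =
          PySem.Chars.findFrom source.toList [t.getD i ' '] ((pos : Nat) : Int) none := by
        simp
      rw [hff, PySem.Chars.findFrom_natCast _ _ _ hpos]
      have hfind := pvFind_eq_hf (t.getD i ' ') (source.toList.drop pos)
      cases hf : pvHf (t.getD i ' ') (source.toList.drop pos) with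
      | some m =>
        -- found at or after pos: no wrap
        rw [hf] at hfind
        simp only at hfind
        rw [hfind]
        have hc1 : ¬((m : Nat) : Int) = -1 := by
          intro hcc
          have h0 := Int.natCast_nonneg m
          rw [hcc] at h0
          norm_num at h0
        rw [if_neg hc1]
        rw [if_neg (not_lt.mpr (by positivity : (0 : Int) ≤ ((pos : Nat) : Int) + ((m : Nat) : Int)))]
        have hmlt : pos + m < source.toList.length := by
          obtain ⟨h1, _⟩ := pvHf_some _ _ _ hf
          have := List.getElem?_eq_some_iff.mp h1
          obtain ⟨hlt, _⟩ := this
          rw [List.length_drop] at hlt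
          omega
        have hto : (((pos : Nat) : Int) + ((m : Nat) : Int)).toNat + 1 = pos + m + 1 := by
          rw [← Nat.cast_add, Int.toNat_natCast]
        rw [hto]
        rw [ih (i + 1) (pos + m + 1) count (by omega) (by omega)]
        have hdd : (source.toList.drop pos).drop (m + 1) = source.toList.drop (pos + m + 1) := by
          rw [List.drop_drop]
          congr 1
        rw [pvPass_find t _ m i hi hf, hdd]
      | none =>
        -- not found from pos: wrap to a fresh copy of source
        rw [hf] at hfind
        simp only at hfind
        rw [hfind]
        rw [if_pos rfl]
        rw [if_pos (show (-1 : Int) < 0 by norm_num)]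
        have hnm : t.getD i ' ' ∉ source.toList.drop pos := (pvHf_none _ _).mp hf
        have hpassp : pvPass t (source.toList.drop pos) i = i := pvPass_nofind t _ i hi hnm
        rw [hpassp]
        have hf2eq : PySem.Str.find source (String.ofList [t.getD i ' ']) =
            PySem.Chars.find source.toList [t.getD i ' '] := by simp
        rw [hf2eq]
        have hfind2 := pvFind_eq_hf (t.getD i ' ') source.toList
        have hip : (pvInner source.toList t source.toList i []).1 = pvPass t source.toList i :=
          pvInner_eq_pass source.toList t source.toList i [] [] rfl (List.nil_sublist _)
        have hspec := pvInner_spec source.toList t source.toList i []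
        cases hf2 : pvHf (t.getD i ' ') source.toList with
        | none =>
          -- the character is nowhere in source: both return -1
          rw [hf2] at hfind2
          simp only at hfind2
          rw [hfind2]
          rw [if_pos (show (-1 : Int) < 0 by norm_num)]
          have hnm2 : t.getD i ' ' ∉ source.toList := (pvHf_none _ _).mp hf2
          have hpass0 : pvPass t source.toList i = i := pvPass_nofind t _ i hi hnm2
          rw [pvOuter, dif_pos hi]
          have hnil2 : (pvInner source.toList t source.toList i []).2 = [] := by
            rw [hip, hpass0] at hspec
            have h2 := hspec.2
            simp at h2
            exact h2
          rw [dif_pos hnil2]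
        | some m2 =>
          -- wrap: new pass starts at the first occurrence in source
          rw [hf2] at hfind2
          simp only at hfind2
          rw [hfind2]
          rw [if_neg (not_lt.mpr (Int.natCast_nonneg m2))]
          have hm2lt : m2 < source.toList.length := by
            obtain ⟨h1, _⟩ := pvHf_some _ _ _ hf2
            obtain ⟨hlt, _⟩ := List.getElem?_eq_some_iff.mp h1
            exact hlt
          have hto2 : ((m2 : Nat) : Int).toNat + 1 = m2 + 1 := by rw [Int.toNat_natCast]
          rw [hto2]
          rw [ih (i + 1) (m2 + 1) (count + 1) (by omega) (by omega)]
          have hpdec : pvPass t source.toList i = pvPass t (source.toList.drop (m2 + 1)) (i + 1) :=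
            pvPass_find t _ m2 i hi hf2
          have hgt : i < pvPass t source.toList i := by
            have := pvPass_ge t (source.toList.drop (m2 + 1)) (i + 1)
            omega
          conv_rhs => rw [pvOuter]
          rw [dif_pos hi]
          rw [dif_neg (by
            intro hnil
            rw [hnil] at hspec
            rw [hip] at hspec
            simp at hspec
            omega)]
          rw [hip, hpdec]
    · -- no target left: both sides return count
      have hge : t.length ≤ i := by omega
      rw [List.drop_eq_nil_of_le hge, pvPass_of_ge t _ i hge, pvOuter, dif_neg (by omega)]
      simp [pvAltLoop]

-- ===== VERDICT (by name: the statement is the Claim_ definition above) =====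
theorem get_min_number_spec : Claim_equal_get_min_number := by
  unfold Claim_equal_get_min_number
  intro source target _
  unfold Spec_get_min_number get_min_number get_min_number_alt
  by_cases ht : target.toList = []
  · rw [pvOuter]
    rw [dif_neg (by simp [ht])]
    rw [if_pos (by simp [ht])]
  · rw [if_neg (by simp [ht])]
    have hmain := pvMain source target.toList target.toList.length 0 0 1 (by omega) (by omega)
    simp only [List.drop_zero] at hmain
    rw [hmain]
    have hip : (pvInner source.toList target.toList source.toList 0 []).1 =
        pvPass target.toList source.toList 0 :=
      pvInner_eq_pass source.toList target.toList source.toList 0 [] [] rfl (List.nil_sublist _)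
    have hspec := pvInner_spec source.toList target.toList source.toList 0 []
    have hpos : 0 < target.toList.length := List.length_pos_iff.mpr ht
    by_cases hz : pvPass target.toList source.toList 0 = 0
    · -- the first pass consumes nothing: both sides return -1
      rw [hz]
      have h2 : (pvInner source.toList target.toList source.toList 0 []).2 = [] := by
        have h2' := hspec.2
        rw [hip, hz] at h2'
        simp at h2'
        exact h2'
      conv_lhs => rw [pvOuter]
      conv_rhs => rw [pvOuter]
      rw [dif_pos hpos, dif_pos hpos, dif_pos h2, dif_pos h2]
    · -- the first pass consumes something: A's loop body matches B's simulation
      conv_lhs => rw [pvOuter]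
      rw [dif_pos hpos]
      have hne : (pvInner source.toList target.toList source.toList 0 []).2 ≠ [] := by
        intro hnil
        apply hz
        have h2' := hspec.2
        rw [hnil, hip] at h2'
        simp at h2'
        omega
      rw [dif_neg hne, hip]
      norm_num
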